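-- pv_equiv track=rewrite | github.com/krystianz27/pp1 | 09-Test2/test2/p3.py | f
-- ===== SOURCE A (Python) =====
-- def f(array2D):
--     number = []
--     for x in array2D:
--         sum = 0
--         for y in x:
--             sum +=y
--         number.append(sum)
--
--     index = number.index(min(number))
--
--     return index
-- ===== SOURCE B (Python) =====
-- def f(array2D):
--     best_idx = None
--     best_sum = 0
--     for i, row in enumerate(array2D):
--         s = 0
--         for y in row:
--             s += y
--         if best_idx is None or s < best_sum:
--             best_idx, best_sum = i, s
--     if best_idx is None:
--         raise ValueError("min() arg is an empty sequence")
--     return best_idx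
-- ===== Notes on version B (the rewrite author's own statement) =====
-- stated objective: alternative
-- what changed: Replaces the build-a-sums-list then min() then list.index() three-pass structure with a single enumerate pass maintaining a running best index and best sum (strict < keeps the first minimal row).
-- outside the precondition, e.g. on f([]): A raises ValueError, B raises ValueError
import Mathlib
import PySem

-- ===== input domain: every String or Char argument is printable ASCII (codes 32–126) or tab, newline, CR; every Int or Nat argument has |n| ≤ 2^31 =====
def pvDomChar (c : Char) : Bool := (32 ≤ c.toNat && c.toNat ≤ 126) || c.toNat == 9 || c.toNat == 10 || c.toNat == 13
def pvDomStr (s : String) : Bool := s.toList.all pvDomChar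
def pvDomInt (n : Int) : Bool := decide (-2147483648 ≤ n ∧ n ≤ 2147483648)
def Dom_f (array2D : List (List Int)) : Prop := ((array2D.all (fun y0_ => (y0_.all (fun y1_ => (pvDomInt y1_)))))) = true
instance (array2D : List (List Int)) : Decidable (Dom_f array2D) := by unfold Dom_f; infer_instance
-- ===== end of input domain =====

-- B is a single pass with a running best index/sum; A builds the sums list, then min(), then .index().
-- On the empty list both A and B raise ValueError (Pre_f excludes it).

-- ===== PORT A =====
def f (array2D : List (List Int)) : Int :=
  let number := array2D.foldl (fun acc x => acc ++ [x.foldl (fun s y => s + y) 0]) []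
  match PySem.List.min? number (fun v => v) with
  | none => 0      -- min([]) raises ValueError; excluded by Pre_f
  | some m => ((PySem.List.index? number m).getD 0 : Int)

-- ===== PORT B =====
-- loop body of B's single pass: acc = None | (best_idx, best_sum); p = (i, row)
def bStep (acc : Option (Int × Int)) (p : Int × List Int) : Option (Int × Int) :=
  let s := p.2.foldl (fun s y => s + y) 0
  match acc with
  | none => some (p.1, s)
  | some (bi, bs) => if s < bs then some (p.1, s) else some (bi, bs)

def f_alt (array2D : List (List Int)) : Int :=
  match (PySem.List.enumerate array2D 0).foldl bStep none with
  | none => 0      -- raise ValueError; excluded by Pre_f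
  | some (bi, _) => bi

-- ===== PRECONDITION & SPEC =====
-- Pre_f excludes the empty list, on which A's min([]) raises ValueError (B raises too).
def Pre_f (array2D : List (List Int)) : Prop := array2D ≠ []
instance (array2D : List (List Int)) : Decidable (Pre_f array2D) := by unfold Pre_f; infer_instance
def pvWitness_f : List (List Int) := [[1]]

def Spec_f (array2D : List (List Int)) (out : Int) : Prop := out = f_alt array2D
instance (array2D : List (List Int)) (out : Int) : Decidable (Spec_f array2D out) := by unfold Spec_f; infer_instance

-- ===== CLAIM (what is proved, stated in full; the proofs are below) =====
def Claim_equal_f : Prop := ∀ (array2D : List (List Int)), Dom_f array2D → Pre_f array2D → Spec_f array2D (f array2D)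

-- ===== LEMMAS AND PROOFS =====

-- recursive spec of B's loop once the accumulator is seeded
def spec (bi bs k : Int) : List Int → Int × Int
  | [] => (bi, bs)
  | y :: t => if y < bs then spec k y (k+1) t else spec bi bs (k+1) t

def rowSum (x : List Int) : Int := x.foldl (fun s y => s + y) 0

lemma foldl_append_map (a : List (List Int)) :
    ∀ acc : List Int,
      a.foldl (fun acc x => acc ++ [x.foldl (fun s y => s + y) 0]) acc = acc ++ a.map rowSum := by
  induction a with
  | nil => intro acc; simp
  | cons x t ih => intro acc; simp [List.foldl, ih, rowSum]

lemma fold_bStep_spec (a : List (List Int)) :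
    ∀ (k bi bs : Int),
      (PySem.List.enumerate a k).foldl bStep (some (bi, bs)) =
        some (spec bi bs k (a.map rowSum)) := by
  induction a with
  | nil => intro k bi bs; simp [PySem.List.enumerate_nil, spec]
  | cons x t ih =>
      intro k bi bs
      simp only [PySem.List.enumerate_cons, List.foldl_cons, bStep, List.map_cons, spec]
      simp only [show (List.foldl (fun s y => s + y) 0 x : Int) = rowSum x from rfl]
      split_ifs with h <;> rw [ih]

lemma spec_fst (t : List Int) :
    ∀ (x bi k : Int),
      (spec bi x k t).1 =
        if t.foldl min x < x then k + ((PySem.List.index? t (t.foldl min x)).getD 0 : Int) else bi := by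
  induction t with
  | nil => intro x bi k; simp [spec]
  | cons y t ih =>
      intro x bi k
      simp only [spec, List.foldl_cons]
      by_cases hy : y < x
      · rw [if_pos hy, ih y k (k+1)]
        have hxy : min x y = y := by omega
        rw [hxy]
        by_cases hm : t.foldl min y < y
        · have hlt : t.foldl min y < x := by omega
          rw [if_pos hm, if_pos hlt,
            PySem.List.index?_cons_of_ne t (by omega : y ≠ t.foldl min y)]
          obtain ⟨j, hj⟩ := Option.isSome_iff_exists.1
            ((PySem.List.index?_isSome_iff t _).2 (by
              rcases PySem.List.foldl_min_mem t y with h | h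
              · omega
              · exact h))
          rw [hj]; simp; ring
        · have heq : t.foldl min y = y :=
            le_antisymm (PySem.List.foldl_min_le t y).1 (by omega)
          rw [if_neg hm, heq, if_pos hy, PySem.List.index?_cons_self]
          simp
      · rw [if_neg hy, ih x bi (k+1)]
        have hxy : min x y = x := by omega
        rw [hxy]
        by_cases hm : t.foldl min x < x
        · rw [if_pos hm, if_pos hm,
            PySem.List.index?_cons_of_ne t (by omega : y ≠ t.foldl min x)]
          obtain ⟨j, hj⟩ := Option.isSome_iff_exists.1
            ((PySem.List.index?_isSome_iff t _).2 (by
              rcases PySem.List.foldl_min_mem t x with h | h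
              · omega
              · exact h))
          rw [hj]; simp; ring
        · rw [if_neg hm, if_neg hm]

-- ===== VERDICT (by name: the statement is the Claim_ definition above) =====
theorem f_spec : Claim_equal_f := by
  intro a _ hpre
  unfold Spec_f f f_alt
  obtain ⟨x, t, rfl⟩ : ∃ x t, a = x :: t := by
    cases a with
    | nil => exact absurd rfl hpre
    | cons x t => exact ⟨x, t, rfl⟩
  rw [foldl_append_map]
  rw [show (PySem.List.enumerate (x :: t) 0).foldl bStep none
        = (PySem.List.enumerate t 1).foldl bStep (some (0, rowSum x)) by
      simp [PySem.List.enumerate_cons, bStep, rowSum]]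
  rw [fold_bStep_spec t 1 0 (rowSum x)]
  simp only [List.nil_append, List.map_cons, PySem.List.min?_id_cons]
  rw [spec_fst (t.map rowSum) (rowSum x) 0 1]
  set l := t.map rowSum with hl
  set m := l.foldl min (rowSum x) with hm
  by_cases hc : m < rowSum x
  · rw [if_pos hc,
      PySem.List.index?_cons_of_ne l (by omega : rowSum x ≠ m)]
    obtain ⟨j, hj⟩ := Option.isSome_iff_exists.1
      ((PySem.List.index?_isSome_iff l m).2 (by
        rcases PySem.List.foldl_min_mem l (rowSum x) with h | h
        · rw [← hm] at h; omega
        · exact h))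
    rw [hj]; simp; omega
  · have heq : m = rowSum x :=
      le_antisymm (by rw [hm]; exact (PySem.List.foldl_min_le l (rowSum x)).1) (by omega)
    rw [heq, if_neg (lt_irrefl (rowSum x)), PySem.List.index?_cons_self]
    simp
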